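-- pv_equiv track=rewrite | github.com/grefano/projetofinal-samuel-final-v82-final-de-novo | input.py | tratar_input_int
-- ===== SOURCE A (Python) =====
-- def tratar_input_int(_str: str):
--     for letra in "abcdefghijklmnopqrstuvwxyz ":
--         _str = _str.replace(letra, "")
--
--     try:
--         result = int(_str)
--     except:
--         return -1
--     return result
-- ===== SOURCE B (Python) =====
-- def tratar_input_int(_str: str):
--     removable = set("abcdefghijklmnopqrstuvwxyz ")
--     cleaned = ''.join(c for c in _str if c not in removable)
--     try:
--         return int(cleaned)
--     except:
--         return -1
-- ===== Notes on version B (the rewrite author's own statement) =====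
-- stated objective: idiomatic
-- what changed: Replaces 27 repeated .replace passes (one per alphabet character) with a single filtering pass over the input string against a membership set.
import Mathlib
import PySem

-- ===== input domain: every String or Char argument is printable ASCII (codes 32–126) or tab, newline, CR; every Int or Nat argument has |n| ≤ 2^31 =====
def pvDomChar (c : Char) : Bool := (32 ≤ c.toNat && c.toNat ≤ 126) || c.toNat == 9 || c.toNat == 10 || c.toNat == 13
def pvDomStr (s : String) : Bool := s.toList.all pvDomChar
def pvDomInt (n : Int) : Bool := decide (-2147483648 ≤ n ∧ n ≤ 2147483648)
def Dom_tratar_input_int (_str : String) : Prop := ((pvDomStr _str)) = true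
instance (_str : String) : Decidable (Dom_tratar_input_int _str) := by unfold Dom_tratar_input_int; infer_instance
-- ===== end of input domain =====

-- B replaces A's 27 repeated `.replace` passes (one per alphabet char) with one filtering pass over the input; return value unchanged.

-- ===== PORT A =====
def tratar_input_int (_str : String) : Int :=
  let s := "abcdefghijklmnopqrstuvwxyz ".toList.foldl
    (fun acc letra => PySem.Str.replace acc (String.ofList [letra]) "") _str
  match PySem.Int.ofStr? s with
  | some n => n
  | none => -1

-- ===== PORT B =====
def pvRemovable : PySem.Set Char := PySem.Set.ofList "abcdefghijklmnopqrstuvwxyz ".toList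

def tratar_input_int_alt (_str : String) : Int :=
  let cleaned := _str.toList.filter (fun c => !(PySem.Set.contains pvRemovable c))
  match PySem.Int.ofChars? cleaned with
  | some n => n
  | none => -1

-- ===== PRECONDITION & SPEC =====
def Spec_tratar_input_int (_str : String) (out : Int) : Prop := out = tratar_input_int_alt _str
instance (_str : String) (out : Int) : Decidable (Spec_tratar_input_int _str out) := by unfold Spec_tratar_input_int; infer_instance

-- ===== CLAIM (what is proved, stated in full; the proofs are below) =====
def Claim_equal_tratar_input_int : Prop := ∀ (_str : String), Dom_tratar_input_int _str → Spec_tratar_input_int _str (tratar_input_int _str)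

-- ===== LEMMAS AND PROOFS =====

-- replace.go with a one-char pattern and empty replacement is a filter (fuel ≥ length)
theorem pv_go_filter (c : Char) : ∀ (fuel : Nat) (l acc : List Char), l.length ≤ fuel →
    PySem.Chars.replace.go [c] [] fuel l acc = acc.reverse ++ l.filter (fun x => !(x == c)) := by
  intro fuel
  induction fuel with
  | zero =>
    intro l acc h
    have : l = [] := List.eq_nil_of_length_eq_zero (Nat.le_zero.mp h)
    subst this
    simp [PySem.Chars.replace.go]
  | succ n ih =>
    intro l acc h
    cases l with
    | nil => simp [PySem.Chars.replace.go]
    | cons a t =>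
      have ht : t.length ≤ n := by simpa using Nat.succ_le_succ_iff.mp (by simpa using h)
      by_cases hac : a = c
      · subst hac
        have hp : List.isPrefixOf [a] (a :: t) = true := by simp [List.isPrefixOf]
        simp [PySem.Chars.replace.go, hp, ih t acc ht, List.filter]
      · have hp : List.isPrefixOf [c] (a :: t) = false := by
          simp [List.isPrefixOf]
          exact fun h' => hac (by simpa using h'.symm)
        have hbe : (a == c) = false := by simp [hac]
        simp [PySem.Chars.replace.go, hp, ih t (a :: acc) ht, List.filter, hbe]

theorem pv_replace_filter (c : Char) (l : List Char) :
    PySem.Chars.replace l [c] [] = l.filter (fun x => !(x == c)) := by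
  have := pv_go_filter c l.length l [] (le_refl _)
  simpa [PySem.Chars.replace] using this

-- folding one-char replaces over a list of characters filters out everything in the list
theorem pv_fold_filter : ∀ (alpha : List Char) (l : List Char),
    alpha.foldl (fun acc c => PySem.Chars.replace acc [c] []) l
      = l.filter (fun x => !(alpha.contains x)) := by
  intro alpha
  induction alpha with
  | nil => intro l; simp
  | cons a as ih =>
    intro l
    rw [List.foldl_cons, pv_replace_filter, ih, List.filter_filter]
    refine List.filter_congr (fun x _ => ?_)
    by_cases hx : x = a <;> simp [hx, List.contains_cons]

-- A's String-level fold, moved to char lists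
theorem pv_foldA_toList (alpha : List Char) (s : String) :
    (alpha.foldl (fun acc letra => PySem.Str.replace acc (String.ofList [letra]) "") s).toList
      = alpha.foldl (fun l c => PySem.Chars.replace l [c] []) s.toList := by
  induction alpha generalizing s with
  | nil => simp
  | cons a as ih =>
    simp only [List.foldl_cons, ih, PySem.Str.toList_replace]
    simp

-- B's set membership is list membership in the alphabet
theorem pv_contains_eq (x : Char) :
    PySem.Set.contains pvRemovable x = ("abcdefghijklmnopqrstuvwxyz ".toList).contains x := by
  have h1 : PySem.Set.contains pvRemovable x = true ↔ x ∈ pvRemovable := by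
    simp [PySem.Set.contains]
  have h2 : x ∈ pvRemovable ↔ x ∈ "abcdefghijklmnopqrstuvwxyz ".toList :=
    PySem.Set.mem_ofList _ x
  have h3 : ("abcdefghijklmnopqrstuvwxyz ".toList).contains x = true
      ↔ x ∈ "abcdefghijklmnopqrstuvwxyz ".toList := by
    simp
  by_cases hx : x ∈ "abcdefghijklmnopqrstuvwxyz ".toList
  · rw [h1.mpr (h2.mpr hx), (h3.mpr hx)]
  · have hne := fun h => hx (h2.mp (h1.mp h))
    cases hcl : PySem.Set.contains pvRemovable x
    · cases hcr : ("abcdefghijklmnopqrstuvwxyz ".toList).contains x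
      · rfl
      · exact absurd (h3.mp hcr) hx
    · exact absurd (hne hcl) id

-- ===== VERDICT (by name: the statement is the Claim_ definition above) =====
theorem tratar_input_int_spec : Claim_equal_tratar_input_int := by
  intro _str _
  unfold Spec_tratar_input_int tratar_input_int tratar_input_int_alt
  simp only [PySem.Int.ofStr?, pv_foldA_toList, pv_fold_filter]
  have : (fun x => !(("abcdefghijklmnopqrstuvwxyz ".toList).contains x))
       = (fun c => !(PySem.Set.contains pvRemovable c)) := by
    funext x; rw [pv_contains_eq]
  rw [this]
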